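-- pv_equiv track=rewrite | github.com/DANMAN1038/Introduction-Python | busybody.py | busybody
-- ===== SOURCE A (Python) =====
-- def busybody(clubs):
--     busybody = []
--     #Goes through each element(names) in list of clubs
--     for names in clubs[0]:
--         busybody_a = True
--         for i in range(len(clubs)):
--             if names not in clubs[i]:
--                 #Stops if names is not in every clubs
--                 busybody_a = False
--         if busybody_a == True:
--             #Adds names to new list busybody if it is in every list
--             busybody.append(names)
--     return busybody
-- ===== SOURCE B (Python) =====
-- def busybody(clubs):
--     common = set(clubs[0])
--     for club in clubs[1:]:
--         common &= set(club)
--     return [name for name in clubs[0] if name in common]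
-- ===== Notes on version B (the rewrite author's own statement) =====
-- stated objective: faster
-- what changed: Replaced the per-name scan over every club (membership test in each club list for each name) by a reduce that folds sets of club members into one running intersection set followed by a single filter pass over clubs[0].
import Mathlib
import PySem

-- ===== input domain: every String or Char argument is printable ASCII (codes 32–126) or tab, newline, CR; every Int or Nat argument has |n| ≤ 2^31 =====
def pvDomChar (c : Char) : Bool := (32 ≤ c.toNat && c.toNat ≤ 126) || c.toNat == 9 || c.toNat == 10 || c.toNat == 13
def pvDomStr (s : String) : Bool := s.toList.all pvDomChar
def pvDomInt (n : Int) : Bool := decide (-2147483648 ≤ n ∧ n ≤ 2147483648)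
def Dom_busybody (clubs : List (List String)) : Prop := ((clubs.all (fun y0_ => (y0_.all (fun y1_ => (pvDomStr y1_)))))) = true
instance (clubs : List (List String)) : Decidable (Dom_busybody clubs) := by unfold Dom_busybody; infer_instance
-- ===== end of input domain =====

-- B replaces A's per-name scan over every club with one running intersection set plus a single filter pass (objective: faster).

-- ===== PORT A =====
def busybody (clubs : List (List String)) : List String :=
  (clubs.headD []).foldl (fun acc names =>
    let busybody_a := (PySem.List.pyRange 0 (clubs.length : Int) 1).foldl
      (fun b i => if names ∈ PySem.List.pyGetD clubs i [] then b else false) true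
    if busybody_a = true then acc ++ [names] else acc) []

-- ===== PORT B =====
def busybody_alt (clubs : List (List String)) : List String :=
  let common := clubs.tail.foldl
    (fun s club => PySem.Set.inter s (PySem.Set.ofList club))
    (PySem.Set.ofList (clubs.headD []))
  (clubs.headD []).filter (fun name => PySem.Set.contains common name)

-- ===== PRECONDITION & SPEC =====
-- Pre_ excludes only the empty list of clubs, on which A raises IndexError (clubs[0]).
def Pre_busybody (clubs : List (List String)) : Prop := clubs ≠ []
instance (clubs : List (List String)) : Decidable (Pre_busybody clubs) := by unfold Pre_busybody; infer_instance
def pvWitness_busybody : List (List String) := [["ann", "bob", "ann"], ["bob", "ann"], ["ann"]]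
def Spec_busybody (clubs : List (List String)) (out : List String) : Prop := out = busybody_alt clubs
instance (clubs : List (List String)) (out : List String) : Decidable (Spec_busybody clubs out) := by unfold Spec_busybody; infer_instance

-- ===== CLAIM (what is proved, stated in full; the proofs are below) =====
def Claim_equal_busybody : Prop := ∀ (clubs : List (List String)), Dom_busybody clubs → Pre_busybody clubs → Spec_busybody clubs (busybody clubs)

-- ===== LEMMAS AND PROOFS =====

-- A's inner flag loop, rewritten as a fold over the clubs themselves, computes "names is in every club".
theorem inner_flag_eq_all (names : String) (cs : List (List String)) (b : Bool) :
    cs.foldl (fun b club => if names ∈ club then b else false) b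
      = (b && decide (∀ club ∈ cs, names ∈ club)) := by
  induction cs generalizing b with
  | nil => simp
  | cons c t ih =>
    simp only [List.foldl_cons, ih]
    by_cases h : names ∈ c <;> simp [h]

-- membership in B's running intersection set
theorem mem_inter_foldl (x : String) (rest : List (List String)) (s : PySem.Set String) :
    x ∈ rest.foldl (fun s club => PySem.Set.inter s (PySem.Set.ofList club)) s
      ↔ x ∈ s ∧ ∀ club ∈ rest, x ∈ club := by
  induction rest generalizing s with
  | nil => simp
  | cons c t ih =>
    simp only [List.foldl_cons, ih, PySem.Set.mem_inter, PySem.Set.mem_ofList,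
      List.mem_cons, forall_eq_or_imp]
    tauto

-- ===== VERDICT (by name: the statement is the Claim_ definition above) =====
theorem busybody_spec : Claim_equal_busybody := by
  intro clubs _ hpre
  unfold Spec_busybody busybody busybody_alt
  obtain ⟨c0, rest, rfl⟩ : ∃ c0 rest, clubs = c0 :: rest :=
    match clubs, hpre with
    | c :: r, _ => ⟨c, r, rfl⟩
  simp only [List.headD_cons, List.tail_cons]
  rw [PySem.List.foldl_append_if_eq_filter
    (p := fun names => (PySem.List.pyRange 0 ((c0 :: rest).length : Int) 1).foldl
      (fun b i => if names ∈ PySem.List.pyGetD (c0 :: rest) i [] then b else false) true),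
    List.nil_append]
  apply List.filter_congr
  intro names hmem
  have hmap : ((PySem.List.pyRange 0 ((c0 :: rest).length : Int) 1).map
      (fun i => PySem.List.pyGetD (c0 :: rest) i [])) = c0 :: rest :=
    PySem.List.map_pyGetD_pyRange_zero (c0 :: rest) []
  have hfold := congrArg
    (List.foldl (fun b club => if names ∈ club then b else false) true) hmap
  rw [List.foldl_map] at hfold
  rw [hfold, inner_flag_eq_all]
  have hcont : PySem.Set.contains
      (rest.foldl (fun s club => PySem.Set.inter s (PySem.Set.ofList club))
        (PySem.Set.ofList c0)) names
      = decide (names ∈ PySem.Set.ofList c0 ∧ ∀ club ∈ rest, names ∈ club) := by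
    rw [Bool.eq_iff_iff, PySem.Set.contains_iff, decide_eq_true_iff]
    exact mem_inter_foldl names rest (PySem.Set.ofList c0)
  rw [hcont]
  simp [PySem.Set.mem_ofList, hmem]
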